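-- pv_equiv track=rewrite | github.com/xcomputing-vicrispr/backend | app/api/export.py | count_permu_IUPAC
-- ===== SOURCE A (Python) =====
-- def count_permu_IUPAC(s: str) -> int:
--     iupac_counts = {
--         "A": 1, "C": 1, "G": 1, "T": 1,
--         "R": 2, "Y": 2, "S": 2, "W": 2,
--         "K": 2, "M": 2,
--         "B": 3, "D": 3, "H": 3, "V": 3,
--         "N": 4
--     }
--     res = 1
--     for ch in s.upper():
--         res *= iupac_counts.get(ch, 1)
--     return res
-- ===== SOURCE B (Python) =====
-- def count_permu_IUPAC(s: str) -> int:
--     factors = {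
--         "R": 2, "Y": 2, "S": 2, "W": 2, "K": 2, "M": 2,
--         "B": 3, "D": 3, "H": 3, "V": 3,
--         "N": 4
--     }
--
--     def prod_tree(u: str) -> int:
--         # balanced product tree: multiply halves recursively
--         if len(u) == 0:
--             return 1
--         if len(u) == 1:
--             return factors.get(u, 1)
--         mid = len(u) // 2
--         return prod_tree(u[:mid]) * prod_tree(u[mid:])
--
--     return prod_tree(s.upper())
-- ===== Notes on version B (the rewrite author's own statement) =====
-- stated objective: alternative
-- what changed: Replaces A's left-to-right running product of dict lookups with a recursive divide-and-conquer product tree over the halved string (balanced multiplication order), with A/C/G/T and unknown characters dropped from the factor table.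
import Mathlib
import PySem

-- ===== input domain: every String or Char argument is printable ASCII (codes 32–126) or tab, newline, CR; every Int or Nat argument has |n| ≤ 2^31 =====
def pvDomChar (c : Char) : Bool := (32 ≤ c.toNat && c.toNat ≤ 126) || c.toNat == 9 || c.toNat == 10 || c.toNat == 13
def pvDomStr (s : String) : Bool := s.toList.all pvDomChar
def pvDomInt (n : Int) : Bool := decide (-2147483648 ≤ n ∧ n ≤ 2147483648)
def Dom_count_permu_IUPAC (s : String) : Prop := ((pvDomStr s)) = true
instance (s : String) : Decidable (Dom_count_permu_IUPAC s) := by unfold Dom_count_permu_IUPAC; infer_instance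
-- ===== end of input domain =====

-- B replaces A's left-to-right running product with a recursive divide-and-conquer
-- product tree over the halved string (a different, balanced multiplication order).

-- ===== PORT A =====
def iupacCounts : PySem.Dict Char Int :=
  PySem.Dict.mk
    [('A', 1), ('C', 1), ('G', 1), ('T', 1),
     ('R', 2), ('Y', 2), ('S', 2), ('W', 2),
     ('K', 2), ('M', 2),
     ('B', 3), ('D', 3), ('H', 3), ('V', 3),
     ('N', 4)]

def count_permu_IUPAC (s : String) : Int :=
  (PySem.Str.upper s).toList.foldl (fun res ch => res * PySem.Dict.getD iupacCounts ch 1) 1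

-- ===== PORT B =====
def altFactors : PySem.Dict Char Int :=
  PySem.Dict.mk
    [('R', 2), ('Y', 2), ('S', 2), ('W', 2), ('K', 2), ('M', 2),
     ('B', 3), ('D', 3), ('H', 3), ('V', 3),
     ('N', 4)]

-- balanced product tree: multiply halves recursively (Source B's prod_tree)
def prodTree : List Char → Int
  | [] => 1
  | [c] => PySem.Dict.getD altFactors c 1
  | c1 :: c2 :: rest =>
      let u := c1 :: c2 :: rest
      let mid := u.length / 2
      prodTree (u.take mid) * prodTree (u.drop mid)
termination_by u => u.length
decreasing_by
  · simp [List.length_take]; omega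
  · simp [List.length_drop]; omega

def count_permu_IUPAC_alt (s : String) : Int :=
  prodTree (PySem.Str.upper s).toList

-- ===== PRECONDITION & SPEC =====
def Spec_count_permu_IUPAC (s : String) (out : Int) : Prop := out = count_permu_IUPAC_alt s
instance (s : String) (out : Int) : Decidable (Spec_count_permu_IUPAC s out) := by unfold Spec_count_permu_IUPAC; infer_instance

-- ===== CLAIM (what is proved, stated in full; the proofs are below) =====
def Claim_equal_count_permu_IUPAC : Prop := ∀ (s : String), Dom_count_permu_IUPAC s → Spec_count_permu_IUPAC s (count_permu_IUPAC s)

-- ===== LEMMAS AND PROOFS =====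

-- A's table (with explicit A/C/G/T ↦ 1 entries) and B's table agree under default 1
theorem getD_tables_eq (c : Char) :
    PySem.Dict.getD iupacCounts c 1 = PySem.Dict.getD altFactors c 1 := by
  by_cases hk : c ∈ ['A', 'C', 'G', 'T', 'R', 'Y', 'S', 'W', 'K', 'M', 'B', 'D', 'H', 'V', 'N']
  · fin_cases hk <;> decide
  · simp only [List.mem_cons, List.not_mem_nil, or_false, not_or] at hk
    obtain ⟨h1, h2, h3, h4, h5, h6, h7, h8, h9, h10, h11, h12, h13, h14, h15⟩ := hk
    simp [iupacCounts, altFactors, PySem.Dict.getD, PySem.Dict.get?,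
      Ne.symm h1, Ne.symm h2, Ne.symm h3, Ne.symm h4, Ne.symm h5,
      Ne.symm h6, Ne.symm h7, Ne.symm h8, Ne.symm h9, Ne.symm h10, Ne.symm h11,
      Ne.symm h12, Ne.symm h13, Ne.symm h14, Ne.symm h15]

-- the product tree computes the product of the per-character factors
theorem prodTree_eq_prod (u : List Char) :
    prodTree u = (u.map (fun c => PySem.Dict.getD altFactors c 1)).prod := by
  induction u using prodTree.induct with
  | case1 => simp [prodTree]
  | case2 c => simp [prodTree]
  | case3 c1 c2 rest u mid ih1 ih2 =>
    rw [prodTree, ih1, ih2, ← List.prod_append, ← List.map_append, List.take_append_drop]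

-- A's fold from any accumulator equals accumulator times that same product
theorem foldA_eq (l : List Char) (r : Int) :
    l.foldl (fun res ch => res * PySem.Dict.getD iupacCounts ch 1) r =
      r * (l.map (fun c => PySem.Dict.getD altFactors c 1)).prod := by
  induction l generalizing r with
  | nil => simp
  | cons c l ih => rw [List.foldl_cons, ih, getD_tables_eq]; simp [mul_assoc]

-- ===== VERDICT (by name: the statement is the Claim_ definition above) =====
theorem count_permu_IUPAC_spec : Claim_equal_count_permu_IUPAC := by
  intro s _
  unfold Spec_count_permu_IUPAC count_permu_IUPAC count_permu_IUPAC_alt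
  rw [foldA_eq, prodTree_eq_prod, one_mul]
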